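-- pv_equiv track=rewrite | github.com/3wnbr1/Remix-Robot | vision/server/human_detector.py | LargestRectangle
-- ===== SOURCE A (Python) =====
-- def LargestRectangle(rects):
--     """Returns the coordinates of the biggest detected rectangle."""
--     surfaces = []
--     for rect in rects:
--         surfaces.append((rect[0]-rect[2]) * (rect[1]-rect[3]))
--     try:
--         rect = rects[surfaces.index(max(surfaces))]
--     except ValueError:
--         rect = None
--     return rect
-- ===== SOURCE B (Python) =====
-- def LargestRectangle(rects):
--     """Returns the coordinates of the biggest detected rectangle."""
--     best = None
--     best_area = None
--     for rect in rects:
--         area = (rect[0] - rect[2]) * (rect[1] - rect[3])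
--         if best_area is None or area > best_area:
--             best, best_area = rect, area
--     return best
-- ===== Notes on version B (the rewrite author's own statement) =====
-- stated objective: simpler
-- what changed: Replaces building a parallel surfaces list plus max() plus list.index() plus a try/except with a single pass that keeps the best rectangle and its area, updating only on strictly larger area (so ties keep the first) and returning None naturally on empty input.
import Mathlib
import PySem

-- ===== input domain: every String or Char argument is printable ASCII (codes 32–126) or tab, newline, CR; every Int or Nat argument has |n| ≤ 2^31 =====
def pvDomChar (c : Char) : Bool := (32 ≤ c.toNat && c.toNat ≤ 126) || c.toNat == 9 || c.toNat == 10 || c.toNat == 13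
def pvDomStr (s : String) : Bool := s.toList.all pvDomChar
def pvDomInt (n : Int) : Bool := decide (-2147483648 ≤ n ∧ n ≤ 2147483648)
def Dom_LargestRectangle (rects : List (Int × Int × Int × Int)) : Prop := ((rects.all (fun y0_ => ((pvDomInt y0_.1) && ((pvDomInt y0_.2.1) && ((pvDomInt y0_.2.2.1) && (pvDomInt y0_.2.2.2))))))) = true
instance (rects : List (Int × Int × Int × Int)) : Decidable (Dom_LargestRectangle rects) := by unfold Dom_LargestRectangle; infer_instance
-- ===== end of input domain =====

-- B replaces the surfaces-list + max() + list.index() + try/except of A with a single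
-- pass keeping the best rectangle and its area so far (strict > keeps the first maximum):
-- simpler, same O(n) cost.


-- ===== PORT A =====
def LargestRectangle (rects : List (Int × Int × Int × Int)) : Option (Int × Int × Int × Int) :=
  -- surfaces = []; for rect in rects: surfaces.append((rect[0]-rect[2]) * (rect[1]-rect[3]))
  let surfaces := rects.foldl
    (fun acc rect => acc ++ [(rect.1 - rect.2.2.1) * (rect.2.1 - rect.2.2.2)]) []
  -- try: rect = rects[surfaces.index(max(surfaces))]  except ValueError: rect = None
  match PySem.List.max? surfaces (fun x => x) with
  | none => none            -- max([]) raises ValueError, caught → None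
  | some m =>
    match PySem.List.index? surfaces m with
    | none => none          -- list.index raises ValueError, caught → None (unreachable)
    | some i => PySem.List.pyGet? rects (i : Int)

-- ===== PORT B =====
def LargestRectangle_alt (rects : List (Int × Int × Int × Int)) : Option (Int × Int × Int × Int) :=
  -- best = None; best_area = None; for rect in rects: ... ; return best
  (rects.foldl
    (fun (st : Option ((Int × Int × Int × Int) × Int)) rect =>
      let area := (rect.1 - rect.2.2.1) * (rect.2.1 - rect.2.2.2)
      match st with
      | none => some (rect, area)                       -- best_area is None
      | some (_, ba) => if area > ba then some (rect, area) else st)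
    none).map (·.1)

-- ===== PRECONDITION & SPEC =====
def Spec_LargestRectangle (rects : List (Int × Int × Int × Int)) (out : Option (Int × Int × Int × Int)) : Prop := out = LargestRectangle_alt rects
instance (rects : List (Int × Int × Int × Int)) (out : Option (Int × Int × Int × Int)) : Decidable (Spec_LargestRectangle rects out) := by unfold Spec_LargestRectangle; infer_instance

-- ===== CLAIM (what is proved, stated in full; the proofs are below) =====
def Claim_equal_LargestRectangle : Prop := ∀ (rects : List (Int × Int × Int × Int)), Dom_LargestRectangle rects → Spec_LargestRectangle rects (LargestRectangle rects)

-- ===== LEMMAS AND PROOFS =====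

-- area of a rectangle, as both programs compute it
def pvArea (r : Int × Int × Int × Int) : Int := (r.1 - r.2.2.1) * (r.2.1 - r.2.2.2)

-- first-maximum recursion: the first rectangle attaining the maximal area, with that area
def pvFM : List (Int × Int × Int × Int) → Option ((Int × Int × Int × Int) × Int)
  | [] => none
  | r :: rs =>
    match pvFM rs with
    | none => some (r, pvArea r)
    | some (b, m) => if pvArea r ≥ m then some (r, pvArea r) else some (b, m)

-- the tail of A's body, after max() has been computed
def pvAfter (l : List (Int × Int × Int × Int)) (m : Int) : Option (Int × Int × Int × Int) :=
  match PySem.List.index? (l.map pvArea) m with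
  | none => none
  | some i => PySem.List.pyGet? l (i : Int)

lemma pvFM_cons_isSome (x : Int × Int × Int × Int) (xs : List (Int × Int × Int × Int)) :
    (pvFM (x :: xs)).isSome := by
  cases h : pvFM xs with
  | none => simp [pvFM, h]
  | some p => obtain ⟨b, m⟩ := p; simp only [pvFM, h]; split <;> simp

lemma pvFM_spec : ∀ (rs : List (Int × Int × Int × Int)) (b : Int × Int × Int × Int) (m : Int),
    pvFM rs = some (b, m) →
    m ∈ rs.map pvArea ∧ ∀ y ∈ rs.map pvArea, y ≤ m := by
  intro rs
  induction rs with
  | nil => intro b m h; simp [pvFM] at h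
  | cons r rs ih =>
    intro b m h
    cases hfm : pvFM rs with
    | none =>
      simp only [pvFM, hfm, Option.some.injEq, Prod.mk.injEq] at h
      have hrs : rs = [] := by
        cases rs with
        | nil => rfl
        | cons x xs => exact absurd hfm (Option.isSome_iff_ne_none.mp (pvFM_cons_isSome x xs))
      subst hrs
      obtain ⟨h1, h2⟩ := h
      subst h2; simp
    | some p =>
      obtain ⟨b', m'⟩ := p
      simp only [pvFM, hfm] at h
      obtain ⟨hm'2, hm'3⟩ := ih b' m' hfm
      by_cases hge : pvArea r ≥ m'
      · simp only [if_pos hge, Option.some.injEq, Prod.mk.injEq] at h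
        obtain ⟨h1, h2⟩ := h
        subst h2
        refine ⟨by simp, ?_⟩
        intro y hy
        rw [List.map_cons] at hy
        rcases List.mem_cons.mp hy with hy | hy
        · omega
        · have := hm'3 y hy; omega
      · simp only [if_neg hge, Option.some.injEq, Prod.mk.injEq] at h
        obtain ⟨h1, h2⟩ := h
        subst h2
        refine ⟨by rw [List.map_cons]; exact List.mem_cons_of_mem _ hm'2, ?_⟩
        intro y hy
        rw [List.map_cons] at hy
        rcases List.mem_cons.mp hy with hy | hy
        · omega
        · exact hm'3 y hy

lemma pvFoldlMax_of_ge : ∀ (s : List Int) (a : Int), (∀ y ∈ s, y ≤ a) → s.foldl max a = a := by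
  intro s
  induction s with
  | nil => intro a _; rfl
  | cons x xs ih =>
    intro a h
    have hx : x ≤ a := h x (by simp)
    simp only [List.foldl_cons]
    rw [max_eq_left hx]
    exact ih a (fun y hy => h y (by simp [hy]))

lemma pvFoldlMax_of_mem : ∀ (s : List Int) (a m : Int), m ∈ s → (∀ y ∈ s, y ≤ m) → a ≤ m →
    s.foldl max a = m := by
  intro s
  induction s with
  | nil => intro a m h; simp at h
  | cons x xs ih =>
    intro a m hmem hub ha
    simp only [List.foldl_cons]
    by_cases hx : m ∈ xs
    · exact ih (max a x) m hx (fun y hy => hub y (by simp [hy]))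
        (by have := hub x (by simp); omega)
    · have hxm : x = m := by
        rcases List.mem_cons.mp hmem with h | h
        · omega
        · exact absurd h hx
      subst hxm
      rw [max_eq_right ha]
      exact pvFoldlMax_of_ge xs x (fun y hy => hub y (by simp [hy]))

lemma pvMax?_of_mem (s : List Int) (m : Int) (hmem : m ∈ s) (hub : ∀ y ∈ s, y ≤ m) :
    PySem.List.max? s (fun x => x) = some m := by
  cases s with
  | nil => simp at hmem
  | cons c t =>
    rw [PySem.List.max?_id_cons]
    congr 1
    by_cases h : m ∈ t
    · exact pvFoldlMax_of_mem t c m h (fun y hy => hub y (by simp [hy])) (hub c (by simp))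
    · have hc : c = m := by
        rcases List.mem_cons.mp hmem with h' | h'
        · omega
        · exact absurd h' h
      subst hc
      exact pvFoldlMax_of_ge t c (fun y hy => hub y (by simp [hy]))

lemma pvGet_cons_succ (rs : List (Int × Int × Int × Int)) (i : Nat) (r : Int × Int × Int × Int) :
    PySem.List.pyGet? (r :: rs) ((i : Int) + 1) = PySem.List.pyGet? rs (i : Int) := by
  have h0 : (0:Int) ≤ (i:Int) + 1 := by omega
  simp [PySem.List.pyGet?, PySem.List.pyIdx?, h0]
  by_cases h : i < rs.length <;> simp [h]

lemma pvGet_cons_zero (rs : List (Int × Int × Int × Int)) (r : Int × Int × Int × Int) :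
    PySem.List.pyGet? (r :: rs) (((0 : Nat) : Int)) = some r := by
  simp [PySem.List.pyGet?, PySem.List.pyIdx?]

-- A's body with the surfaces list rewritten as a map
lemma pvA_unfold (l : List (Int × Int × Int × Int)) :
    LargestRectangle l =
      Option.elim (PySem.List.max? (l.map pvArea) (fun x => x)) none (pvAfter l) := by
  simp only [LargestRectangle]
  rw [PySem.List.foldl_append_singleton_eq_map, List.nil_append]
  rw [show (l.map (fun rect => (rect.1 - rect.2.2.1) * (rect.2.1 - rect.2.2.2))) = l.map pvArea from rfl]
  cases h : PySem.List.max? (l.map pvArea) (fun x => x) with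
  | none => rfl
  | some m => rfl

-- A equals the first-maximum recursion
lemma pvA_eq_fm : ∀ (rects : List (Int × Int × Int × Int)),
    LargestRectangle rects = (pvFM rects).map (·.1) := by
  intro rects
  induction rects with
  | nil => rfl
  | cons r rs ih =>
    rw [pvA_unfold]
    cases hfm : pvFM rs with
    | none =>
      have hrs : rs = [] := by
        cases rs with
        | nil => rfl
        | cons x xs => exact absurd hfm (Option.isSome_iff_ne_none.mp (pvFM_cons_isSome x xs))
      subst hrs
      rw [show ([r].map pvArea) = [pvArea r] from rfl]
      rw [pvMax?_of_mem [pvArea r] (pvArea r) (by simp) (by simp)]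
      simp only [Option.elim_some, pvAfter]
      rw [show ([r].map pvArea) = [pvArea r] from rfl]
      rw [PySem.List.index?_cons_self]
      show PySem.List.pyGet? [r] (((0 : Nat) : Int)) = Option.map (fun x => x.1) (pvFM [r])
      rw [pvGet_cons_zero]
      simp [pvFM]
    | some p =>
      obtain ⟨b, m⟩ := p
      obtain ⟨hm2, hm3⟩ := pvFM_spec rs b m hfm
      by_cases hge : pvArea r ≥ m
      · have hmax : PySem.List.max? ((r :: rs).map pvArea) (fun x => x) = some (pvArea r) := by
          apply pvMax?_of_mem _ _ (by rw [List.map_cons]; exact List.mem_cons_self)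
          intro y hy
          rw [List.map_cons] at hy
          rcases List.mem_cons.mp hy with hy | hy
          · omega
          · have := hm3 y hy; omega
        rw [hmax]
        simp only [Option.elim_some, pvAfter]
        rw [List.map_cons, PySem.List.index?_cons_self]
        show PySem.List.pyGet? (r :: rs) (((0 : Nat) : Int)) = Option.map (fun x => x.1) (pvFM (r :: rs))
        rw [pvGet_cons_zero]
        simp [pvFM, hfm, hge]
      · have hmax : PySem.List.max? ((r :: rs).map pvArea) (fun x => x) = some m := by
          apply pvMax?_of_mem _ _ (by rw [List.map_cons]; exact List.mem_cons_of_mem _ hm2)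
          intro y hy
          rw [List.map_cons] at hy
          rcases List.mem_cons.mp hy with hy | hy
          · omega
          · exact hm3 y hy
        rw [hmax]
        simp only [Option.elim_some, pvAfter]
        have hne : pvArea r ≠ m := by omega
        rw [List.map_cons, PySem.List.index?_cons_of_ne _ hne]
        have hnn : (PySem.List.index? (rs.map pvArea) m).isSome := by
          rw [PySem.List.index?_eq_idxOf?]
          exact List.isSome_idxOf?.mpr hm2
        obtain ⟨i, hi⟩ := Option.isSome_iff_exists.mp hnn
        rw [hi]
        show PySem.List.pyGet? (r :: rs) (((i + 1 : Nat)) : Int) = Option.map (fun x => x.1) (pvFM (r :: rs))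
        have hcast : (((i + 1 : Nat)) : Int) = (i : Int) + 1 := by push_cast; ring
        rw [hcast, pvGet_cons_succ]
        have hArs : LargestRectangle rs = PySem.List.pyGet? rs (i : Int) := by
          rw [pvA_unfold, pvMax?_of_mem (rs.map pvArea) m hm2 hm3]
          simp only [Option.elim_some, pvAfter]
          rw [hi]
        rw [← hArs, ih]
        simp [pvFM, hfm, hge]

-- B's loop from a non-None state, characterised by the first-maximum recursion
lemma pvB_go : ∀ (xs : List (Int × Int × Int × Int)) (b : Int × Int × Int × Int) (ba : Int),
    xs.foldl
      (fun (st : Option ((Int × Int × Int × Int) × Int)) rect =>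
        let area := (rect.1 - rect.2.2.1) * (rect.2.1 - rect.2.2.2)
        match st with
        | none => some (rect, area)
        | some (_, ba') => if area > ba' then some (rect, area) else st)
      (some (b, ba))
    = (match pvFM xs with
       | none => some (b, ba)
       | some (c, m) => if m > ba then some (c, m) else some (b, ba)) := by
  intro xs
  induction xs with
  | nil => intro b ba; rfl
  | cons x xs ih =>
    intro b ba
    simp only [List.foldl_cons]
    by_cases hx : pvArea x > ba
    · rw [show (if (x.1 - x.2.2.1) * (x.2.1 - x.2.2.2) > ba
            then some (x, (x.1 - x.2.2.1) * (x.2.1 - x.2.2.2))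
            else some (b, ba))
          = some (x, pvArea x) by simp only [pvArea] at hx; rw [if_pos hx]; rfl]
      rw [ih x (pvArea x)]
      cases hfm : pvFM xs with
      | none => simp [pvFM, hfm, hx]
      | some p =>
        obtain ⟨c, m⟩ := p
        by_cases hcm : pvArea x ≥ m
        · simp [pvFM, hfm, hcm, show ¬(m > pvArea x) by omega, hx]
        · simp [pvFM, hfm, hcm, show m > pvArea x by omega, show m > ba by omega]
    · rw [show (if (x.1 - x.2.2.1) * (x.2.1 - x.2.2.2) > ba
            then some (x, (x.1 - x.2.2.1) * (x.2.1 - x.2.2.2))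
            else some (b, ba))
          = some (b, ba) by simp only [pvArea] at hx; rw [if_neg hx]]
      rw [ih b ba]
      cases hfm : pvFM xs with
      | none => simp [pvFM, hfm, show ¬(pvArea x > ba) from hx]
      | some p =>
        obtain ⟨c, m⟩ := p
        by_cases hcm : pvArea x ≥ m
        · simp [pvFM, hfm, hcm, show ¬(pvArea x > ba) from hx, show ¬(m > ba) by omega]
        · simp [pvFM, hfm, hcm]

lemma pvB_eq_fm : ∀ (rects : List (Int × Int × Int × Int)),
    LargestRectangle_alt rects = (pvFM rects).map (·.1) := by
  intro rects
  cases rects with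
  | nil => rfl
  | cons r rs =>
    simp only [LargestRectangle_alt, List.foldl_cons]
    rw [pvB_go rs r ((r.1 - r.2.2.1) * (r.2.1 - r.2.2.2))]
    cases hfm : pvFM rs with
    | none => simp [pvFM, hfm]
    | some p =>
      obtain ⟨c, m⟩ := p
      show Option.map (fun x => x.1)
          (if m > (r.1 - r.2.2.1) * (r.2.1 - r.2.2.2) then some (c, m)
           else some (r, (r.1 - r.2.2.1) * (r.2.1 - r.2.2.2)))
        = Option.map (fun x => x.1) (pvFM (r :: rs))
      by_cases h : m > (r.1 - r.2.2.1) * (r.2.1 - r.2.2.2)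
      · rw [if_pos h]
        simp [pvFM, hfm, show ¬(pvArea r ≥ m) by simp only [pvArea]; omega]
      · rw [if_neg h]
        simp [pvFM, hfm, show pvArea r ≥ m by simp only [pvArea]; omega]

theorem pvMain (rects : List (Int × Int × Int × Int)) :
    LargestRectangle rects = LargestRectangle_alt rects := by
  rw [pvA_eq_fm, pvB_eq_fm]

-- ===== VERDICT (by name: the statement is the Claim_ definition above) =====
theorem LargestRectangle_spec : Claim_equal_LargestRectangle := by
  intro rects _
  unfold Spec_LargestRectangle
  exact pvMain rects
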